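-- pv_equiv track=rewrite | github.com/fr4ncol/os_algorithms | sjf.py | sjf_sim
-- ===== SOURCE A (Python) =====
-- def sjf_sim(data, numberOfProcesses):
--     """
--     Funkcja zwracjaca liste procesow, wraz z czasami zakonczenia
--     (completion time)
--     """
--     timer = 0
--     queue = []  # kolejka procesow oczekajacych na wykonanie
--     completed = []
--
--     while True:
--         if len(completed) == numberOfProcesses:
--             return completed  # zwrocenie listy zawierajaca czasy zakonczenia procesu
--         i = 0
--         while i < len(data):
--             if data[i][0] <= timer:  # sprawdzenie czy dany proces juz dotarl
--                 queue.append(data[i])  # gdy dotarl dodanie go do kolejki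
--                 del data[i]
--             else:
--                 i += 1
--         queue = sorted(queue, key=lambda x: x[1])  # Sortowanie, by sprawdzic najmniejszy burst time
--         if len(queue)!=0:
--             current_process = queue[0]
--             completion_time = current_process[1] + timer  # obliczanie czasu wykonania procesu
--             completed.append((current_process[0],current_process[1], completion_time))
--             timer = current_process[1] + timer
--             queue.pop(0)  # usuniecie procesu z kolejki po jego wykonaniu
--
--         else:
--             timer+=1
-- ===== SOURCE B (Python) =====
-- def sjf_sim(data, numberOfProcesses):
--     """Event-driven SJF: keep a ready list sorted by burst and jump the timer
--     to the next arrival instead of stepping one time unit at a time.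
--     (Unlike A this does not consume the caller's `data` list.)"""
--     pending = list(data)
--     ready = []          # always sorted by burst time, stable
--     completed = []
--     timer = 0
--     while len(completed) < numberOfProcesses:
--         rest = []
--         for p in pending:
--             if p[0] <= timer:
--                 j = 0
--                 while j < len(ready) and ready[j][1] <= p[1]:
--                     j += 1
--                 ready.insert(j, p)
--             else:
--                 rest.append(p)
--         pending = rest
--         if ready:
--             arr, burst = ready.pop(0)
--             timer += burst
--             completed.append((arr, burst, timer))
--         else:
--             timer = min(p[0] for p in pending)
--     return completed
-- ===== Notes on version B (the rewrite author's own statement) =====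
-- stated objective: alternative
-- what changed: B replaces A's unit-time stepping (timer += 1 with a full rescan of data per tick) and per-iteration full re-sort of the queue by an event-driven simulation: one admission scan per scheduling event, a stable sorted-insert into the ready list, and a timer jump straight to the next arrival when idle.
import Mathlib
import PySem

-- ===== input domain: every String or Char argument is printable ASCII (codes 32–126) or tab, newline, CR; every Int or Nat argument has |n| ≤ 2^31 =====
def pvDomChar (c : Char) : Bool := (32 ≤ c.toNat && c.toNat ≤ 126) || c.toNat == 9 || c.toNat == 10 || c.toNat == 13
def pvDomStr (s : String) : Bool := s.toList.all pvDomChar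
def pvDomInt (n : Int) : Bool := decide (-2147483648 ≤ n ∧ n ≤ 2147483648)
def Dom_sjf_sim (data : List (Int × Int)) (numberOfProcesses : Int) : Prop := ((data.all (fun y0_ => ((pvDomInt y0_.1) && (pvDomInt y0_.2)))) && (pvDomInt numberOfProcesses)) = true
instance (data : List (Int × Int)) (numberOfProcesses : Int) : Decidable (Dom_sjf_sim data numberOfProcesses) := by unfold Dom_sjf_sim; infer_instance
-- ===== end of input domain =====

-- B replaces A's unit-time stepping and per-iteration full re-sort by an event-driven
-- simulation (sorted-insert into a ready list, timer jumped to the next arrival).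
-- A mutates its `data` argument (deletes admitted processes); the equivalence proved
-- here is about the RETURN value only — B does not mutate `data`.

-- ===== PORT A =====
-- inner `while i < len(data)` loop: arrived processes are appended to queue, others kept in data
def sjfAdmitA (timer : Int) (data queue : List (Int × Int)) : List (Int × Int) × List (Int × Int) :=
  match data with
  | [] => (queue, [])
  | p :: ps =>
    if p.1 ≤ timer then sjfAdmitA timer ps (queue ++ [p])
    else
      let r := sjfAdmitA timer ps queue
      (r.1, p :: r.2)

-- outer `while True` loop; fuel makes the loop total (A diverges when numberOfProcesses
-- is negative or exceeds len(data); such inputs are outside Pre_), the fuel chosen in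
-- sjf_sim is proved sufficient on Pre_
def sjfLoopA (fuel : Nat) (timer : Int) (data queue : List (Int × Int))
    (completed : List (Int × Int × Int)) (n : Int) : List (Int × Int × Int) :=
  match fuel with
  | 0 => completed
  | fuel + 1 =>
    if (completed.length : Int) = n then completed
    else
      let r := sjfAdmitA timer data queue
      let q2 := PySem.List.sorted r.1 (fun x => x.2)
      match q2 with
      | [] => sjfLoopA fuel (timer + 1) r.2 [] completed n
      | c :: rest =>
          sjfLoopA fuel (c.2 + timer) r.2 rest (completed ++ [(c.1, c.2, c.2 + timer)]) n

def sjf_sim (data : List (Int × Int)) (numberOfProcesses : Int) : List (Int × Int × Int) :=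
  sjfLoopA (data.length + (data.foldl (fun (acc : Int) (p : Int × Int) => acc + max p.1 0 + |p.2|) 0).toNat + 1)
    0 data [] [] numberOfProcesses

-- ===== PORT B =====
-- `ready.insert(j, p)` after the scan `while j < len(ready) and ready[j][1] <= p[1]`
def sjfInsert (ready : List (Int × Int)) (p : Int × Int) : List (Int × Int) :=
  match ready with
  | [] => [p]
  | q :: qs => if q.2 ≤ p.2 then q :: sjfInsert qs p else p :: q :: qs

-- the `for p in pending` admission loop of B: (ready', rest)
def sjfAdmitB (timer : Int) (pending ready : List (Int × Int)) (rest : List (Int × Int)) :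
    List (Int × Int) × List (Int × Int) :=
  match pending with
  | [] => (ready, rest)
  | p :: ps =>
    if p.1 ≤ timer then sjfAdmitB timer ps (sjfInsert ready p) rest
    else sjfAdmitB timer ps ready (rest ++ [p])

-- `min(p[0] for p in pending)` = PySem.List.min?; none = ValueError (outside Pre_)
def sjfLoopB (fuel : Nat) (timer : Int) (pending ready : List (Int × Int))
    (completed : List (Int × Int × Int)) (n : Int) : List (Int × Int × Int) :=
  match fuel with
  | 0 => completed
  | fuel + 1 =>
    if (completed.length : Int) < n then
      let r := sjfAdmitB timer pending ready []
      match r.1 with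
      | c :: rtail =>
          sjfLoopB fuel (timer + c.2) r.2 rtail (completed ++ [(c.1, c.2, timer + c.2)]) n
      | [] =>
        match PySem.List.min? r.2 (fun p => p.1) with
        | some m => sjfLoopB fuel m.1 r.2 [] completed n
        | none => completed
    else completed

def sjf_sim_alt (data : List (Int × Int)) (numberOfProcesses : Int) : List (Int × Int × Int) :=
  sjfLoopB (2 * data.length + 2) 0 data [] [] numberOfProcesses

-- ===== PRECONDITION & SPEC =====
-- Pre_ excludes exactly the inputs on which A never returns: the outer loop terminates
-- iff 0 ≤ numberOfProcesses ≤ len(data) (otherwise len(completed) never equals it).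
def Pre_sjf_sim (data : List (Int × Int)) (numberOfProcesses : Int) : Prop :=
  0 ≤ numberOfProcesses ∧ numberOfProcesses ≤ data.length
instance (data : List (Int × Int)) (numberOfProcesses : Int) : Decidable (Pre_sjf_sim data numberOfProcesses) := by unfold Pre_sjf_sim; infer_instance

def pvWitness_sjf_sim : (List (Int × Int)) × Int := ([(2, 3), (0, 5), (2, 1)], 3)

def Spec_sjf_sim (data : List (Int × Int)) (numberOfProcesses : Int) (out : List (Int × Int × Int)) : Prop := out = sjf_sim_alt data numberOfProcesses
instance (data : List (Int × Int)) (numberOfProcesses : Int) (out : List (Int × Int × Int)) : Decidable (Spec_sjf_sim data numberOfProcesses out) := by unfold Spec_sjf_sim; infer_instance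

-- ===== CLAIM (what is proved, stated in full; the proofs are below) =====
def Claim_equal_sjf_sim : Prop := ∀ (data : List (Int × Int)) (numberOfProcesses : Int), Dom_sjf_sim data numberOfProcesses → Pre_sjf_sim data numberOfProcesses → Spec_sjf_sim data numberOfProcesses (sjf_sim data numberOfProcesses)

-- ===== LEMMAS AND PROOFS =====

-- weight of a not-yet-arrived process / of a queued process (A's fuel accounting)
def pvW (l : List (Int × Int)) : Int := (l.map (fun p => max p.1 0 + |p.2|)).sum
def pvB (l : List (Int × Int)) : Int := (l.map (fun p => |p.2|)).sum

lemma sjfAdmitA_eq (timer : Int) (data queue : List (Int × Int)) :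
    sjfAdmitA timer data queue =
      (queue ++ data.filter (fun p => decide (p.1 ≤ timer)),
       data.filter (fun p => !decide (p.1 ≤ timer))) := by
  induction data generalizing queue with
  | nil => simp [sjfAdmitA]
  | cons p ps ih =>
    by_cases h : p.1 ≤ timer <;> simp [sjfAdmitA, h, ih]

lemma sjfInsert_eq_insertBy (ready : List (Int × Int)) (p : Int × Int) :
    sjfInsert ready p = PySem.List.insertBy (fun a b => decide (a.2 < b.2)) p ready := by
  induction ready with
  | nil => rfl
  | cons q qs ih =>
    by_cases h : q.2 ≤ p.2
    · have h2 : ¬ p.2 < q.2 := not_lt.mpr h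
      simp [sjfInsert, PySem.List.insertBy, h, h2, ih]
    · have h2 : p.2 < q.2 := lt_of_not_ge h
      simp [sjfInsert, PySem.List.insertBy, h, h2]

lemma sjfAdmitB_eq (timer : Int) (pending ready rest : List (Int × Int)) :
    sjfAdmitB timer pending ready rest =
      ((pending.filter (fun p => decide (p.1 ≤ timer))).foldl sjfInsert ready,
       rest ++ pending.filter (fun p => !decide (p.1 ≤ timer))) := by
  induction pending generalizing ready rest with
  | nil => simp [sjfAdmitB]
  | cons p ps ih =>
    by_cases h : p.1 ≤ timer <;> simp [sjfAdmitB, h, ih]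

-- stable re-sort of an already-sorted queue with a batch appended = insert each batch element
lemma sorted_append_eq_foldl (queue batch : List (Int × Int))
    (hq : queue.Pairwise (fun a b => a.2 ≤ b.2)) :
    PySem.List.sorted (queue ++ batch) (fun x => x.2) = batch.foldl sjfInsert queue := by
  have h1 := PySem.List.sorted_eq_foldl_insertBy (queue ++ batch) (fun x : Int × Int => x.2)
  rw [h1, List.foldl_append]
  have h2 : List.foldl (fun acc x => PySem.List.insertBy (fun a b => decide (a.2 < b.2)) x acc) [] queue
      = queue := by
    rw [← PySem.List.sorted_eq_foldl_insertBy queue (fun x : Int × Int => x.2)]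
    exact PySem.List.sorted_eq_self_of_pairwise queue _ hq
  rw [h2]
  exact PySem.List.foldl_congr_mem _ _ _ _ (fun acc x _ => (sjfInsert_eq_insertBy acc x).symm)

-- sum of a partition by a filter
lemma pvW_filter (l : List (Int × Int)) (f : Int × Int → Bool) :
    pvW l = pvW (l.filter f) + pvW (l.filter (fun p => !f p)) := by
  induction l with
  | nil => simp [pvW]
  | cons p ps ih =>
    by_cases h : f p <;> simp [pvW, h] at * <;> omega

lemma pvB_perm {l₁ l₂ : List (Int × Int)} (h : l₁.Perm l₂) : pvB l₁ = pvB l₂ :=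
  List.Perm.sum_eq (h.map _)

lemma pvB_le_pvW (l : List (Int × Int)) : pvB l ≤ pvW l := by
  induction l with
  | nil => simp [pvB, pvW]
  | cons p ps ih => simp [pvB, pvW] at *; omega

lemma mem_le_pvW {p : Int × Int} {l : List (Int × Int)} (h : p ∈ l) : p.1 ≤ pvW l := by
  have h1 : max p.1 0 + |p.2| ≤ pvW l := by
    apply List.single_le_sum (l := l.map (fun p => max p.1 0 + |p.2|))
    · intro x hx
      simp only [List.mem_map] at hx
      obtain ⟨q, _, rfl⟩ := hx
      have := abs_nonneg q.2
      omega
    · exact List.mem_map_of_mem h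
  calc p.1 ≤ max p.1 0 := le_max_left _ _
    _ ≤ max p.1 0 + |p.2| := by have := abs_nonneg p.2; omega
    _ ≤ pvW l := h1

lemma pvB_append (a b : List (Int × Int)) : pvB (a ++ b) = pvB a + pvB b := by
  simp [pvB]

lemma pvW_foldl (l : List (Int × Int)) :
    ∀ a : Int, l.foldl (fun (acc : Int) (p : Int × Int) => acc + max p.1 0 + |p.2|) a = a + pvW l := by
  induction l with
  | nil => intro a; simp [pvW]
  | cons p ps ih =>
    intro a
    simp only [List.foldl_cons, ih, pvW, List.map_cons, List.sum_cons]
    omega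

-- A's idle run: while nothing has arrived and the queue is empty, A only ticks the timer
lemma sjfLoopA_idle (data : List (Int × Int)) (completed : List (Int × Int × Int)) (n m : Int)
    (hlt : (completed.length : Int) < n) (hm : ∀ p ∈ data, m ≤ p.1) :
    ∀ (j fA : Nat) (timer : Int), timer + j = m → j ≤ fA →
      sjfLoopA fA timer data [] completed n = sjfLoopA (fA - j) m data [] completed n := by
  intro j
  induction j with
  | zero => intro fA timer ht _; simp at ht; simp [ht]
  | succ j ih =>
    intro fA timer ht hf
    match fA, hf with
    | fA + 1, hf =>
      have hne : ¬ ((completed.length : Int) = n) := by omega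
      have hbatch : data.filter (fun p => decide (p.1 ≤ timer)) = [] := by
        apply List.filter_eq_nil_iff.mpr
        intro p hp
        have := hm p hp
        simp; omega
      have hrest : data.filter (fun p => !decide (p.1 ≤ timer)) = data := by
        apply List.filter_eq_self.mpr
        intro p hp
        have := hm p hp
        simp; omega
      rw [sjfLoopA, if_neg hne]
      simp only [sjfAdmitA_eq, hbatch, hrest, List.append_nil]
      have hsort : PySem.List.sorted ([] : List (Int × Int)) (fun x : Int × Int => x.2) = [] := rfl
      rw [hsort]
      have := ih fA (timer + 1) (by omega) (by omega)
      simpa using this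

lemma sjfLoopA_term (timer : Int) (data queue : List (Int × Int))
    (completed : List (Int × Int × Int)) (n : Int) (h : (completed.length : Int) = n) :
    ∀ fA, sjfLoopA fA timer data queue completed n = completed := by
  intro fA
  cases fA with
  | zero => rfl
  | succ f => simp [sjfLoopA, h]

lemma sjfLoopB_term (timer : Int) (pending ready : List (Int × Int))
    (completed : List (Int × Int × Int)) (n : Int) (h : ¬ (completed.length : Int) < n) :
    ∀ fB, sjfLoopB fB timer pending ready completed n = completed := by
  intro fB
  cases fB with
  | zero => rfl
  | succ f => simp [sjfLoopB, h]

-- the main simulation lemma: from matching states the two loops return the same list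
lemma loopA_eq_loopB (k : Nat) :
    ∀ (fA fB : Nat) (timer : Int) (data queue : List (Int × Int))
      (completed : List (Int × Int × Int)) (n : Int),
      (n - completed.length).toNat = k →
      queue.Pairwise (fun a b => a.2 ≤ b.2) →
      (completed.length : Int) ≤ n →
      n ≤ (completed.length : Int) + queue.length + data.length →
      k + (pvW data + pvB queue - timer).toNat + 1 ≤ fA →
      2 * k ≤ fB →
      sjfLoopA fA timer data queue completed n = sjfLoopB fB timer data queue completed n := by
  induction k with
  | zero =>
    intro fA fB timer data queue completed n hk hq hle hcount hfA hfB
    have heq : (completed.length : Int) = n := by omega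
    rw [sjfLoopA_term _ _ _ _ _ heq, sjfLoopB_term _ _ _ _ _ (by omega)]
  | succ k ihk =>
    intro fA fB timer data queue completed n hk hq hle hcount hfA hfB
    have hlt : (completed.length : Int) < n := by omega
    obtain ⟨fA', rfl⟩ : ∃ f, fA = f + 1 := ⟨fA - 1, by omega⟩
    obtain ⟨fB', rfl⟩ : ∃ f, fB = f + 1 := ⟨fB - 1, by omega⟩
    rw [sjfLoopA, sjfLoopB, if_neg (by omega), if_pos hlt, sjfAdmitA_eq, sjfAdmitB_eq]
    simp only [List.nil_append]
    rw [← sorted_append_eq_foldl _ _ hq]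
    have hWsplit : pvW data = pvW (data.filter (fun p => decide (p.1 ≤ timer)))
        + pvW (data.filter (fun p => !decide (p.1 ≤ timer))) := pvW_filter data _
    have hBperm := pvB_perm (PySem.List.sorted_perm (queue ++ data.filter (fun p => decide (p.1 ≤ timer))) (fun x : Int × Int => x.2) false)
    rw [pvB_append] at hBperm
    have hBleW := pvB_le_pvW (data.filter (fun p => decide (p.1 ≤ timer)))
    have hlenq : (PySem.List.sorted (queue ++ data.filter (fun p => decide (p.1 ≤ timer))) (fun x : Int × Int => x.2)).length
        = queue.length + (data.filter (fun p => decide (p.1 ≤ timer))).length := by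
      rw [PySem.List.length_sorted, List.length_append]
    have hlenf : (data.filter (fun p => decide (p.1 ≤ timer))).length
        + (data.filter (fun p => !decide (p.1 ≤ timer))).length = data.length :=
      (List.length_eq_length_filter_add (l := data) (fun p => decide (p.1 ≤ timer))).symm
    have hpair := PySem.List.sorted_pairwise (queue ++ data.filter (fun p => decide (p.1 ≤ timer))) (fun x : Int × Int => x.2)
    cases hq2 : PySem.List.sorted (queue ++ data.filter (fun p => decide (p.1 ≤ timer))) (fun x : Int × Int => x.2) with
    | cons c rest =>
      -- a process is executed on both sides
      dsimp only
      rw [hq2] at hBperm hlenq hpair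
      have habs1 := abs_nonneg c.2
      have habs2 := neg_abs_le c.2
      have hBrest : pvB (c :: rest) = |c.2| + pvB rest := by simp [pvB]
      have hcomm : c.2 + timer = timer + c.2 := by omega
      rw [hcomm]
      apply ihk
      · simp; omega
      · exact List.Pairwise.of_cons hpair
      · simp; omega
      · simp only [List.length_cons] at hlenq
        simp; omega
      · rw [hBrest] at hBperm; simp; omega
      · omega
    | nil =>
      -- idle: nothing has arrived and the queue is empty; A ticks, B jumps
      dsimp only
      have hp := PySem.List.sorted_perm (queue ++ data.filter (fun p => decide (p.1 ≤ timer))) (fun x : Int × Int => x.2) false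
      rw [hq2] at hp
      have hnil : queue ++ data.filter (fun p => decide (p.1 ≤ timer)) = [] := hp.nil_eq.symm
      rw [List.append_eq_nil_iff] at hnil
      obtain ⟨hqnil, hbnil⟩ := hnil
      have hlate : ∀ p ∈ data, timer < p.1 := by
        intro p hp2
        have := List.filter_eq_nil_iff.mp hbnil p hp2
        simp at this; omega
      have hrest : data.filter (fun p => !decide (p.1 ≤ timer)) = data := by
        apply List.filter_eq_self.mpr
        intro p hp2
        have := hlate p hp2
        simp; omega
      rw [hrest]
      subst hqnil
      simp only [List.length_nil] at hcount
      have hdne : data ≠ [] := by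
        intro h; subst h; simp at hcount; omega
      cases hmin : PySem.List.min? data (fun p : Int × Int => p.1) with
      | none => exact absurd ((PySem.List.min?_eq_none_iff data _).mp hmin) hdne
      | some mel =>
        dsimp only
        have hmem := PySem.List.min?_mem hmin
        have hisMin := PySem.List.min?_isMin hmin
        have hmW : mel.1 ≤ pvW data := mem_le_pvW hmem
        have htm : timer < mel.1 := hlate mel hmem
        have hB0 : pvB ([] : List (Int × Int)) = 0 := by simp [pvB]
        rw [hB0] at hfA
        -- A: run the idle ticks up to mel.1
        rw [sjfLoopA_idle data completed n mel.1 hlt (fun p hp2 => hisMin p hp2)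
              (mel.1 - (timer + 1)).toNat fA' (timer + 1) (by omega) (by omega)]
        -- one more round on each side: now the minimum has arrived
        obtain ⟨g, hg⟩ : ∃ g, fA' - (mel.1 - (timer + 1)).toNat = g + 1 :=
          ⟨fA' - (mel.1 - (timer + 1)).toNat - 1, by omega⟩
        rw [hg]
        obtain ⟨gB, rfl⟩ : ∃ g2, fB' = g2 + 1 := ⟨fB' - 1, by omega⟩
        rw [sjfLoopA, sjfLoopB, if_neg (by omega), if_pos hlt, sjfAdmitA_eq, sjfAdmitB_eq]
        simp only [List.nil_append]
        rw [← sorted_append_eq_foldl _ _ (List.Pairwise.nil)]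
        simp only [List.nil_append]
        have hWsplit' : pvW data = pvW (data.filter (fun p => decide (p.1 ≤ mel.1)))
            + pvW (data.filter (fun p => !decide (p.1 ≤ mel.1))) := pvW_filter data _
        have hBperm' := pvB_perm (PySem.List.sorted_perm (data.filter (fun p => decide (p.1 ≤ mel.1))) (fun x : Int × Int => x.2) false)
        have hBleW' := pvB_le_pvW (data.filter (fun p => decide (p.1 ≤ mel.1)))
        have hlenq' : (PySem.List.sorted (data.filter (fun p => decide (p.1 ≤ mel.1))) (fun x : Int × Int => x.2)).length
            = (data.filter (fun p => decide (p.1 ≤ mel.1))).length := by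
          rw [PySem.List.length_sorted]
        have hlenf' : (data.filter (fun p => decide (p.1 ≤ mel.1))).length
            + (data.filter (fun p => !decide (p.1 ≤ mel.1))).length = data.length :=
          (List.length_eq_length_filter_add (l := data) (fun p => decide (p.1 ≤ mel.1))).symm
        have hpair' := PySem.List.sorted_pairwise (data.filter (fun p => decide (p.1 ≤ mel.1))) (fun x : Int × Int => x.2)
        have hmbatch : mel ∈ data.filter (fun p => decide (p.1 ≤ mel.1)) :=
          List.mem_filter.mpr ⟨hmem, by simp⟩
        cases hq2' : PySem.List.sorted (data.filter (fun p => decide (p.1 ≤ mel.1))) (fun x : Int × Int => x.2) with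
        | nil =>
          exfalso
          rw [hq2'] at hlenq'
          have := List.length_pos_of_mem hmbatch
          simp at hlenq'
          omega
        | cons c rest =>
          dsimp only
          rw [hq2'] at hBperm' hlenq' hpair'
          have habs1 := abs_nonneg c.2
          have habs2 := neg_abs_le c.2
          have hBrest : pvB (c :: rest) = |c.2| + pvB rest := by simp [pvB]
          have hcomm : c.2 + mel.1 = mel.1 + c.2 := by omega
          rw [hcomm]
          apply ihk
          · simp; omega
          · exact List.Pairwise.of_cons hpair'
          · simp; omega
          · simp only [List.length_cons] at hlenq'
            simp only [List.length_append, List.length_cons, List.length_nil]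
            push_cast
            omega
          · rw [hBrest] at hBperm'
            have key : pvW (data.filter (fun p => !decide (p.1 ≤ mel.1))) + pvB rest
                - (mel.1 + c.2) ≤ pvW data - mel.1 := by omega
            have key2 := Int.toNat_le_toNat key
            omega
          · omega

-- ===== VERDICT (by name: the statement is the Claim_ definition above) =====
theorem sjf_sim_spec : Claim_equal_sjf_sim := by
  intro data n _ hpre
  obtain ⟨h0, hlen⟩ := hpre
  unfold Spec_sjf_sim sjf_sim sjf_sim_alt
  apply loopA_eq_loopB n.toNat
  · simp
  · exact List.Pairwise.nil
  · simpa using h0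
  · simpa using hlen
  · rw [pvW_foldl]
    have h1 : pvB ([] : List (Int × Int)) = 0 := by simp [pvB]
    rw [h1]
    omega
  · omega
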